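-- pv_equiv track=rewrite | github.com/jschnei/infinite-corridor-generation | unused/directions_hard.py | encode_directions
-- ===== SOURCE A (Python) =====
-- DIR_LETTERS = {
--     'A': 'dddddddduuuurrrrrrdddduuuuuuuullllllrrrrrrrrr',
--     'B': 'ddddddddrrrrrruuuullllllrrrrrruuuullllllrrrrrrrrr',
--     'C': 'ddddddddrrrrrrlllllluuuuuuuurrrrrrrrr',
--     'D': 'ddddddddrrrruuuuuuuullllrrrrrrr',
--     'E': 'ddddddddrrrrrrlllllluuuurrrrrrlllllluuuurrrrrrrrr',
--     'F': 'dddddddduuuurrrllluuuurrrrrrrrr',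
--     'G': 'ddddddddrrrrrruuuulllrrrddddlllllluuuuuuuurrrrrrrrr',
--     'H': 'dddddddduuuurrrrrrdddduuuuuuuurrr',
--     'I': 'dddddddduuuuuuuurrr',
--     'J': 'rrrddddddddlllrrruuuuuuuurrrrrr',
--     'K': 'dddddddduuuurrrddddrrrllluuuuuuuurrrrrr',
--     'L': 'ddddddddrrrrrruuuurrruuuu',
--     'M': 'dddddddduuuuuuuurrrdddddddduuuuuuuurrrdddddddduuuuuuuurrr',
--     'N': 'dddddddduuuuuuuurrrddddrrrdddduuuuuuuurrr',
--     'O': 'ddddddddrrrrrruuuuuuuullllllrrrrrrrrr',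
--     'P': 'dddddddduuuurrrrrruuuullllllrrrrrrrrr',
--     'Q': 'ddddrrrrrrdddduuuuuuuullllllrrrrrrrrr',
--     'R': 'dddddddduuuurrrddddrrrllluuuurrruuuullllllrrrrrrrrr',
--     'S': 'ddddrrrrrrddddllllllrrrrrruuuulllllluuuurrrrrrrrr',
--     'T': 'rrrdddddddduuuuuuuurrrrrr',
--     'U': 'ddddddddrrrrrruuuuuuuurrr',
--     'V': 'ddddrrrddddrrruuuuuuuurrr',
--     'W': 'ddddddddrrruuuuuuuuddddddddrrruuuuuuuurrr',
--     'X': 'rrrddddddddlllrrrrrrllluuuuuuuurrrrrr',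
--     'Y': 'ddddrrrdddduuuurrruuuurrr',
--     'Z': 'rrrrrrddddllllllddddrrrrrrlllllluuuurrrrrruuuurrr'
-- }
--
-- def encode_directions(message):
--   expanded = ''.join(DIR_LETTERS[c] for c in message)
--   chunks = []
--
--   cur_c = expanded[0]
--   cur_run = 1
--
--   for c in expanded[1:]:
--     if c == cur_c:
--       cur_run += 1
--     else:
--       chunks.append((cur_run, cur_c.upper()))
--       cur_run = 1
--       cur_c = c
--   chunks.append((cur_run, cur_c.upper()))
--
--   return chunks
-- ===== SOURCE B (Python) =====
-- DIR_LETTERS = {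
--     'A': 'dddddddduuuurrrrrrdddduuuuuuuullllllrrrrrrrrr',
--     'B': 'ddddddddrrrrrruuuullllllrrrrrruuuullllllrrrrrrrrr',
--     'C': 'ddddddddrrrrrrlllllluuuuuuuurrrrrrrrr',
--     'D': 'ddddddddrrrruuuuuuuullllrrrrrrr',
--     'E': 'ddddddddrrrrrrlllllluuuurrrrrrlllllluuuurrrrrrrrr',
--     'F': 'dddddddduuuurrrllluuuurrrrrrrrr',
--     'G': 'ddddddddrrrrrruuuulllrrrddddlllllluuuuuuuurrrrrrrrr',
--     'H': 'dddddddduuuurrrrrrdddduuuuuuuurrr',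
--     'I': 'dddddddduuuuuuuurrr',
--     'J': 'rrrddddddddlllrrruuuuuuuurrrrrr',
--     'K': 'dddddddduuuurrrddddrrrllluuuuuuuurrrrrr',
--     'L': 'ddddddddrrrrrruuuurrruuuu',
--     'M': 'dddddddduuuuuuuurrrdddddddduuuuuuuurrrdddddddduuuuuuuurrr',
--     'N': 'dddddddduuuuuuuurrrddddrrrdddduuuuuuuurrr',
--     'O': 'ddddddddrrrrrruuuuuuuullllllrrrrrrrrr',
--     'P': 'dddddddduuuurrrrrruuuullllllrrrrrrrrr',
--     'Q': 'ddddrrrrrrdddduuuuuuuullllllrrrrrrrrr',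
--     'R': 'dddddddduuuurrrddddrrrllluuuurrruuuullllllrrrrrrrrr',
--     'S': 'ddddrrrrrrddddllllllrrrrrruuuulllllluuuurrrrrrrrr',
--     'T': 'rrrdddddddduuuuuuuurrrrrr',
--     'U': 'ddddddddrrrrrruuuuuuuurrr',
--     'V': 'ddddrrrddddrrruuuuuuuurrr',
--     'W': 'ddddddddrrruuuuuuuuddddddddrrruuuuuuuurrr',
--     'X': 'rrrddddddddlllrrrrrrllluuuuuuuurrrrrr',
--     'Y': 'ddddrrrdddduuuurrruuuurrr',
--     'Z': 'rrrrrrddddllllllddddrrrrrrlllllluuuurrrrrruuuurrr'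
-- }
--
--
-- def _rle(s):
--     # run-length encode one fixed letter string (used once per letter at module load)
--     runs = []
--     for ch in s:
--         if runs and runs[-1][1] == ch:
--             runs[-1] = (runs[-1][0] + 1, ch)
--         else:
--             runs.append((1, ch))
--     return runs
--
--
-- # each letter's direction string pre-encoded into its run list, computed once
-- LETTER_RUNS = {k: _rle(v) for k, v in DIR_LETTERS.items()}
--
--
-- def encode_directions(message):
--     # stitch the precomputed per-letter run lists together, merging at each boundary;
--     # the expanded direction string is never materialised or scanned per message
--     runs = []
--     for c in message:
--         lruns = LETTER_RUNS[c]
--         if runs and runs[-1][1] == lruns[0][1]: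
--             runs[-1] = (runs[-1][0] + lruns[0][0], lruns[0][1])
--             runs.extend(lruns[1:])
--         else:
--             runs.extend(lruns)
--     return [(n, ch.upper()) for n, ch in runs]
-- ===== Notes on version B (the rewrite author's own statement) =====
-- stated objective: alternative
-- what changed: A expands the whole message into one direction string and run-length encodes it char by char; B never builds or scans that string per message: it precomputes each letter's run list once (RLE table) and stitches the 26 short per-letter run lists together, merging only at letter boundaries.
import Mathlib
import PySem

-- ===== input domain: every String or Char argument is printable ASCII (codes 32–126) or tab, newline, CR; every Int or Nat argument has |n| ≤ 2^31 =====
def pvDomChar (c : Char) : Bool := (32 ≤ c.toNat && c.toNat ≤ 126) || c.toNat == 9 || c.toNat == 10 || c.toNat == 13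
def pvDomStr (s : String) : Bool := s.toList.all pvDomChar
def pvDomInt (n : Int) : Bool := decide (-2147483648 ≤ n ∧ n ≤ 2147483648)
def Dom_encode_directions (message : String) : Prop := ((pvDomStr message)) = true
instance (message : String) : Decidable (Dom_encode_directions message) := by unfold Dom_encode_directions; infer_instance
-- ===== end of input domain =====

-- B never scans the expanded direction string per message: it stitches precomputed per-letter
-- run lists (RLE table built once) together, merging runs at each letter boundary.


-- shared module constant DIR_LETTERS (same dict literal in Source A and Source B)
def DIR_LETTERS : List (Char × String) := [
  ('A', "dddddddduuuurrrrrrdddduuuuuuuullllllrrrrrrrrr"),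
  ('B', "ddddddddrrrrrruuuullllllrrrrrruuuullllllrrrrrrrrr"),
  ('C', "ddddddddrrrrrrlllllluuuuuuuurrrrrrrrr"),
  ('D', "ddddddddrrrruuuuuuuullllrrrrrrr"),
  ('E', "ddddddddrrrrrrlllllluuuurrrrrrlllllluuuurrrrrrrrr"),
  ('F', "dddddddduuuurrrllluuuurrrrrrrrr"),
  ('G', "ddddddddrrrrrruuuulllrrrddddlllllluuuuuuuurrrrrrrrr"),
  ('H', "dddddddduuuurrrrrrdddduuuuuuuurrr"),
  ('I', "dddddddduuuuuuuurrr"),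
  ('J', "rrrddddddddlllrrruuuuuuuurrrrrr"),
  ('K', "dddddddduuuurrrddddrrrllluuuuuuuurrrrrr"),
  ('L', "ddddddddrrrrrruuuurrruuuu"),
  ('M', "dddddddduuuuuuuurrrdddddddduuuuuuuurrrdddddddduuuuuuuurrr"),
  ('N', "dddddddduuuuuuuurrrddddrrrdddduuuuuuuurrr"),
  ('O', "ddddddddrrrrrruuuuuuuullllllrrrrrrrrr"),
  ('P', "dddddddduuuurrrrrruuuullllllrrrrrrrrr"),
  ('Q', "ddddrrrrrrdddduuuuuuuullllllrrrrrrrrr"),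
  ('R', "dddddddduuuurrrddddrrrllluuuurrruuuullllllrrrrrrrrr"),
  ('S', "ddddrrrrrrddddllllllrrrrrruuuulllllluuuurrrrrrrrr"),
  ('T', "rrrdddddddduuuuuuuurrrrrr"),
  ('U', "ddddddddrrrrrruuuuuuuurrr"),
  ('V', "ddddrrrddddrrruuuuuuuurrr"),
  ('W', "ddddddddrrruuuuuuuuddddddddrrruuuuuuuurrr"),
  ('X', "rrrddddddddlllrrrrrrllluuuuuuuurrrrrr"),
  ('Y', "ddddrrrdddduuuurrruuuurrr"),
  ('Z', "rrrrrrddddllllllddddrrrrrrlllllluuuurrrrrruuuurrr")]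

-- DIR_LETTERS[c] as a list of chars; default "" unused under Pre_ (missing key = Python KeyError, excluded)
def pvDirOf (c : Char) : List Char := ((DIR_LETTERS.lookup c).getD "").toList

-- c.upper() on a single char (PySem.Str.upper, exact on ASCII)
def pvUp (c : Char) : String := PySem.Str.upper (String.ofList [c])

-- ===== PORT A =====
-- ''.join(DIR_LETTERS[c] for c in message)
def pvExpand (message : String) : List Char := message.toList.flatMap pvDirOf

-- A's for-loop over expanded[1:] carrying cur_c, cur_run, chunks; trailing flush append
def pvLoopA : List Char → Char → Int → List (Int × String) → List (Int × String)
  | [], cur_c, cur_run, chunks => chunks ++ [(cur_run, pvUp cur_c)]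
  | c :: rest, cur_c, cur_run, chunks =>
      if c == cur_c then pvLoopA rest cur_c (cur_run + 1) chunks
      else pvLoopA rest c 1 (chunks ++ [(cur_run, pvUp cur_c)])

def encode_directions (message : String) : List (Int × String) :=
  match pvExpand message with
  | [] => []  -- Python raises IndexError at expanded[0]; excluded by Pre_
  | cur_c :: rest => pvLoopA rest cur_c 1 []

-- ===== PORT B =====
-- one step of Source B's _rle loop: mutate the last run or append a fresh (1, ch)
def pvRleStep (runs : List (Int × Char)) (ch : Char) : List (Int × Char) :=
  match runs.getLast? with
  | some lastp =>
      if lastp.2 == ch then runs.dropLast ++ [(lastp.1 + 1, ch)]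
      else runs ++ [(1, ch)]
  | none => runs ++ [(1, ch)]

-- _rle(s): run-length encode one letter string
def pvRleB (s : List Char) : List (Int × Char) := s.foldl pvRleStep []

-- LETTER_RUNS = {k: _rle(v) for k, v in DIR_LETTERS.items()}
def LETTER_RUNS : List (Char × List (Int × Char)) :=
  DIR_LETTERS.map (fun p => (p.1, pvRleB p.2.toList))

-- LETTER_RUNS[c]; default [] unused under Pre_ (missing key = Python KeyError, excluded)
def pvLetterRuns (c : Char) : List (Int × Char) :=
  (LETTER_RUNS.lookup c).getD []

-- the body of B's for-loop: merge a letter's run list onto the accumulator at the boundary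
def pvMergeB (runs lruns : List (Int × Char)) : List (Int × Char) :=
  match runs.getLast?, lruns with
  | some lastp, hd :: tl =>
      if lastp.2 == hd.2 then runs.dropLast ++ ((lastp.1 + hd.1, hd.2) :: tl)
      else runs ++ lruns
  | _, _ => runs ++ lruns

def encode_directions_alt (message : String) : List (Int × String) :=
  (message.toList.foldl (fun runs c => pvMergeB runs (pvLetterRuns c)) []).map
    (fun p => (p.1, pvUp p.2))

-- ===== PRECONDITION & SPEC =====
-- Python A raises IndexError on the empty message and KeyError on any char outside 'A'..'Z'.
def Pre_encode_directions (message : String) : Prop :=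
  message.toList ≠ [] ∧ message.toList.all (fun c => 65 ≤ c.toNat && c.toNat ≤ 90) = true
instance (message : String) : Decidable (Pre_encode_directions message) := by
  unfold Pre_encode_directions; infer_instance
def pvWitness_encode_directions : String := "AB"

def Spec_encode_directions (message : String) (out : List (Int × String)) : Prop :=
  out = encode_directions_alt message
instance (message : String) (out : List (Int × String)) : Decidable (Spec_encode_directions message out) := by
  unfold Spec_encode_directions; infer_instance

-- ===== CLAIM =====
def Claim_equal_encode_directions : Prop := ∀ (message : String), Dom_encode_directions message → Pre_encode_directions message → Spec_encode_directions message (encode_directions message)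

-- ===== LEMMAS AND PROOFS =====

-- canonical run-length encoding, the pivot both ports are reduced to
def pvRunLen (c : Char) : List Char → Nat
  | [] => 0
  | d :: t => if d == c then pvRunLen c t + 1 else 0

def pvRle : List Char → List (Int × Char)
  | [] => []
  | c :: rest => ((1 + pvRunLen c rest : Int), c) :: pvRle (rest.drop (pvRunLen c rest))
  termination_by l => l.length
  decreasing_by simp

-- canonical boundary merge of two run lists
def pvMergeRuns : List (Int × Char) → List (Int × Char) → List (Int × Char)
  | [], ys => ys
  | [x], [] => [x]
  | [x], y :: ys => if x.2 == y.2 then (x.1 + y.1, x.2) :: ys else x :: y :: ys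
  | x :: x' :: xs, ys => x :: pvMergeRuns (x' :: xs) ys

lemma pvRunLen_le (c : Char) (s : List Char) : pvRunLen c s ≤ s.length := by
  induction s with
  | nil => simp [pvRunLen]
  | cons d t ih =>
      by_cases h : d == c
      · simp [pvRunLen, h]; omega
      · simp [pvRunLen, h]

lemma pvRunLen_append (c : Char) (s t : List Char) :
    pvRunLen c (s ++ t) =
      if pvRunLen c s < s.length then pvRunLen c s else s.length + pvRunLen c t := by
  induction s with
  | nil => simp [pvRunLen]
  | cons d s' ih =>
      by_cases h : d == c
      · simp only [List.cons_append, pvRunLen, h, if_true, ih, List.length_cons]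
        split_ifs <;> omega
      · simp [pvRunLen, h]

lemma pvRle_ne_nil (s : List Char) (h : s ≠ []) : pvRle s ≠ [] := by
  cases s with
  | nil => exact absurd rfl h
  | cons c rest => rw [pvRle]; simp

lemma pvMergeRuns_cons_cons (x : Int × Char) (xs ys : List (Int × Char)) (h : xs ≠ []) :
    pvMergeRuns (x :: xs) ys = x :: pvMergeRuns xs ys := by
  cases xs with
  | nil => exact absurd rfl h
  | cons x' t => rfl

-- KEY LEMMA: merging canonical run lists is run-length encoding the concatenation
lemma pvRle_nil : pvRle [] = [] := by rw [pvRle]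

lemma pvRle_cons (c : Char) (rest : List Char) :
    pvRle (c :: rest)
      = ((1 + pvRunLen c rest : Int), c) :: pvRle (rest.drop (pvRunLen c rest)) := by
  rw [pvRle]

lemma drop_len_add {α : Type} (u v : List α) (m : Nat) :
    (u ++ v).drop (u.length + m) = v.drop m := by
  induction u with
  | nil => simp
  | cons a u ih => simp [Nat.succ_add, ih]

lemma merge_rle (s t : List Char) : pvMergeRuns (pvRle s) (pvRle t) = pvRle (s ++ t) := by
  induction hn : s.length using Nat.strong_induction_on generalizing s with
  | _ n ih =>
  cases s with
  | nil => rw [pvRle_nil, pvMergeRuns, List.nil_append]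
  | cons c rest =>
    have hk := pvRunLen_le c rest
    rw [pvRle_cons]
    by_cases hlt : pvRunLen c rest < rest.length
    · -- the first run of s ends inside rest
      have hne : rest.drop (pvRunLen c rest) ≠ [] := by
        intro h; rw [List.drop_eq_nil_iff] at h; omega
      rw [pvMergeRuns_cons_cons _ _ _ (pvRle_ne_nil _ hne),
          ih (rest.drop (pvRunLen c rest)).length (by subst hn; simp) _ rfl]
      show _ = pvRle (c :: (rest ++ t))
      rw [pvRle_cons, pvRunLen_append, if_pos hlt,
          List.drop_append_of_le_length (le_of_lt hlt)]
    · -- rest is one single run of c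
      have hkeq : pvRunLen c rest = rest.length := by omega
      have hdrop : rest.drop (pvRunLen c rest) = [] := by
        rw [hkeq, List.drop_length]
      rw [hdrop, pvRle_nil]
      show pvMergeRuns [_] (pvRle t) = pvRle (c :: (rest ++ t))
      cases t with
      | nil => simp [pvRle_nil, pvMergeRuns, pvRle_cons, hkeq, List.drop_length]
      | cons d tr =>
        rw [pvRle_cons d tr]
        show pvMergeRuns [_] (_ :: _) = _
        rw [pvRle_cons, pvRunLen_append, if_neg (by omega), hkeq]
        by_cases hcd : c = d
        · subst hcd
          have h1 : pvRunLen c (c :: tr) = pvRunLen c tr + 1 := by simp [pvRunLen]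
          rw [pvMergeRuns, if_pos (by simp), h1]
          have h2 : (rest ++ c :: tr).drop (rest.length + (pvRunLen c tr + 1))
              = tr.drop (pvRunLen c tr) := by
            rw [show rest ++ c :: tr = (rest ++ [c]) ++ tr from by simp,
                show rest.length + (pvRunLen c tr + 1) = (rest ++ [c]).length + pvRunLen c tr from by
                  simp; omega]
            exact drop_len_add _ _ _
          rw [h2]
          congr 2
          push_cast
          ring
        · have hdc : d ≠ c := fun h => hcd h.symm
          have h0 : pvRunLen c (d :: tr) = 0 := by simp [pvRunLen, hdc]
          rw [pvMergeRuns, if_neg (by simp [hcd]), h0, Nat.add_zero]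
          rw [show (rest ++ d :: tr).drop rest.length = d :: tr from by
                have h3 := drop_len_add rest (d :: tr) 0
                rw [Nat.add_zero] at h3
                rw [h3, List.drop_zero]]
          rw [pvRle_cons d tr]

-- B's Python merge step equals the canonical merge
lemma mergeB_eq (runs ys : List (Int × Char)) : pvMergeB runs ys = pvMergeRuns runs ys := by
  induction runs with
  | nil => cases ys <;> rfl
  | cons x xs ih =>
    cases xs with
    | nil =>
      cases ys with
      | nil => rfl
      | cons y ys' =>
        rcases x with ⟨nx, cx⟩; rcases y with ⟨ny, cy⟩
        by_cases h : cx = cy <;> simp [pvMergeB, pvMergeRuns, h]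
    | cons x' t =>
      rw [pvMergeRuns_cons_cons _ _ _ (by simp), ← ih]
      unfold pvMergeB
      cases ys with
      | nil => simp
      | cons y ys' =>
        simp only [List.getLast?_cons_cons, List.dropLast_cons_of_ne_nil (List.cons_ne_nil x' t)]
        cases h : (x' :: t).getLast? with
        | none => simp at h
        | some lastp => by_cases hc : lastp.2 == y.2 <;> simp [hc]

lemma pvRle_singleton (ch : Char) : pvRle [ch] = [(1, ch)] := by
  rw [pvRle_cons]; simp [pvRunLen, pvRle_nil]

-- _rle's loop step is the canonical merge with a singleton run
lemma rleStep_eq (runs : List (Int × Char)) (ch : Char) :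
    pvRleStep runs ch = pvMergeRuns runs [(1, ch)] := by
  rw [← mergeB_eq]
  unfold pvRleStep pvMergeB
  cases runs.getLast? <;> simp

lemma rleB_fold (s : List Char) : ∀ p, s.foldl pvRleStep (pvRle p) = pvRle (p ++ s) := by
  induction s with
  | nil => intro p; simp
  | cons ch s' ih =>
    intro p
    have hstep : pvRleStep (pvRle p) ch = pvRle (p ++ [ch]) := by
      rw [rleStep_eq, ← pvRle_singleton, merge_rle]
    simp only [List.foldl_cons, hstep, ih (p ++ [ch]), List.append_assoc, List.singleton_append]

-- Source B's _rle is the canonical run-length encoding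
lemma rleB_eq (s : List Char) : pvRleB s = pvRle s := by
  have h := rleB_fold s []
  simpa [pvRleB, pvRle_nil] using h

lemma lookup_map_rleB (l : List (Char × String)) (c : Char) :
    (l.map (fun p => (p.1, pvRleB p.2.toList))).lookup c
      = (l.lookup c).map (fun s => pvRleB s.toList) := by
  induction l with
  | nil => rfl
  | cons p t ih =>
    by_cases h : c == p.1 <;> simp [List.lookup, h, ih]

-- the precomputed table entry is the canonical rle of the letter's direction string
lemma letterRuns_eq (c : Char) : pvLetterRuns c = pvRle (pvDirOf c) := by
  unfold pvLetterRuns LETTER_RUNS pvDirOf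
  rw [lookup_map_rleB]
  cases DIR_LETTERS.lookup c with
  | none => simp [pvRle_nil]
  | some s => simp [rleB_eq]

-- B's main fold stitches the per-letter rles into the rle of the expansion
lemma foldB_eq (l : List Char) : ∀ p,
    l.foldl (fun runs c => pvMergeB runs (pvLetterRuns c)) (pvRle p)
      = pvRle (p ++ l.flatMap pvDirOf) := by
  induction l with
  | nil => intro p; simp
  | cons c l' ih =>
    intro p
    show l'.foldl _ (pvMergeB (pvRle p) (pvLetterRuns c)) = _
    rw [mergeB_eq, letterRuns_eq, merge_rle, ih (p ++ pvDirOf c)]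
    simp [List.flatMap_cons, List.append_assoc]

-- A's loop computes the canonical rle (mapped through upper)
lemma pvLoopA_eq (rest : List Char) : ∀ (cc : Char) (n : Int) (acc : List (Int × String)),
    pvLoopA rest cc n acc
      = acc ++ ((n + pvRunLen cc rest, pvUp cc) ::
          (pvRle (rest.drop (pvRunLen cc rest))).map (fun p => (p.1, pvUp p.2))) := by
  induction rest with
  | nil => intro cc n acc; simp [pvLoopA, pvRunLen, pvRle_nil]
  | cons c t ih =>
    intro cc n acc
    by_cases h : c = cc
    · subst h
      simp only [pvLoopA, pvRunLen, beq_self_eq_true, if_true, ih, List.drop_succ_cons]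
      simp only [Nat.cast_add, Nat.cast_one, List.append_cancel_left_eq, List.cons.injEq]
      refine ⟨?_, trivial⟩
      rw [show n + 1 + (pvRunLen c t : Int) = n + ((pvRunLen c t : Int) + 1) from by omega]
    · have hb : (c == cc) = false := by simp [h]
      simp only [pvLoopA, pvRunLen, hb, ih, Bool.false_eq_true, if_false, List.drop_zero]
      rw [pvRle_cons]
      simp [List.append_assoc]

-- ===== VERDICT =====
theorem encode_directions_spec : Claim_equal_encode_directions := by
  intro message _ _
  unfold Spec_encode_directions encode_directions encode_directions_alt
  have hB : message.toList.foldl (fun runs c => pvMergeB runs (pvLetterRuns c)) []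
      = pvRle (pvExpand message) := by
    have h := foldB_eq message.toList []
    simpa [pvRle_nil, pvExpand] using h
  rw [hB]
  cases h : pvExpand message with
  | nil => simp [pvRle_nil]
  | cons c rest =>
    show pvLoopA rest c 1 [] = _
    rw [pvLoopA_eq, pvRle_cons]
    simp
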